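-- pv_equiv track=rewrite | github.com/bardownncelly13/BugSlayer | codetracing/extract_calls.py | callee_name_from_text
-- ===== SOURCE A (Python) =====
-- def callee_name_from_text(s: str) -> str:
--     s = (s or "").strip()
--     if not s:
--         return ""
--     for sep in ("::", ".", "->"):
--         if sep in s:
--             s = s.split(sep)[-1]
--     return s.strip().rstrip("(").strip()
-- ===== SOURCE B (Python) =====
-- def callee_name_from_text(s: str) -> str:
--     # Single left-to-right character scan: reset the collected tail whenever a
--     # separator ("::", ".", "->") starts at the current position, instead of
--     # repeatedly splitting and reassigning the string.
--     t = (s or "").strip()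
--     if not t:
--         return ""
--     tail = []
--     i = 0
--     n = len(t)
--     while i < n:
--         if t[i] == ':' and i + 1 < n and t[i + 1] == ':':
--             tail = []
--             i += 2
--         elif t[i] == '.':
--             tail = []
--             i += 1
--         elif t[i] == '-' and i + 1 < n and t[i + 1] == '>':
--             tail = []
--             i += 2
--         else:
--             tail.append(t[i])
--             i += 1
--     u = ''.join(tail).strip()
--     return u.rstrip('(').strip()
-- ===== Notes on version B (the rewrite author's own statement) =====
-- stated objective: alternative
-- what changed: Instead of A's three successive split-on-separator-and-take-last-piece passes that each reassign the string, B makes a single left-to-right character scan that resets an accumulator whenever one of the three separator tokens starts at the current position, then applies the same final strip/rstrip.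
import Mathlib
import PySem

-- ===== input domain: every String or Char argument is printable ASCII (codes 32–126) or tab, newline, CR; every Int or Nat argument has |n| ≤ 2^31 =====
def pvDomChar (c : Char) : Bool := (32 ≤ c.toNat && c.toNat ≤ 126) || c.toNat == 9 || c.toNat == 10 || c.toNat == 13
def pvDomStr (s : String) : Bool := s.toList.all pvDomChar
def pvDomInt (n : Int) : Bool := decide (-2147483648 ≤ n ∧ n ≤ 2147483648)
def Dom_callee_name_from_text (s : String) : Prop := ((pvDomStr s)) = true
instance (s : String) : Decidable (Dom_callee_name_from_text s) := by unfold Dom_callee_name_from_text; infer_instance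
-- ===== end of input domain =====

-- B replaces A's three split-and-reassign passes by one left-to-right character scan
-- that resets an accumulator at each separator occurrence (objective: alternative).

-- ===== PORT A =====
-- s.split(sep)[-1] (split with a nonempty separator never yields an empty list)
def pvLastPart (t sep : List Char) : List Char :=
  (PySem.Chars.splitOn t sep).getLastD []

-- u.rstrip('('): hand port (exact; PySem.Chars.stripChars strips both sides)
def pvRstripParen (l : List Char) : List Char :=
  (l.reverse.dropWhile (fun c => c = '(')).reverse

def callee_name_from_text (s : String) : String :=
  let t := PySem.Chars.strip s.toList      -- s = (s or "").strip() ('s or ""' is the identity on str)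
  if t = [] then ""                        -- if not s: return ""
  else
    -- for sep in ("::", ".", "->"): if sep in s: s = s.split(sep)[-1]   (loop unrolled)
    let t1 := if PySem.Chars.isIn [':', ':'] t then pvLastPart t [':', ':'] else t
    let t2 := if PySem.Chars.isIn ['.'] t1 then pvLastPart t1 ['.'] else t1
    let t3 := if PySem.Chars.isIn ['-', '>'] t2 then pvLastPart t2 ['-', '>'] else t2
    -- return s.strip().rstrip("(").strip()
    String.ofList (PySem.Chars.strip (pvRstripParen (PySem.Chars.strip t3)))

-- ===== PORT B =====
-- the while loop of Source B: acc = tail, second argument = t[i:]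
def pvScan : List Char → List Char → List Char
  | acc, [] => acc
  | acc, c :: rest =>
    if c = ':' ∧ rest.head? = some ':' then pvScan [] rest.tail
    else if c = '.' then pvScan [] rest
    else if c = '-' ∧ rest.head? = some '>' then pvScan [] rest.tail
    else pvScan (acc ++ [c]) rest
termination_by _ l => l.length
decreasing_by all_goals simp [List.length_tail]

def callee_name_from_text_alt (s : String) : String :=
  let t := PySem.Chars.strip s.toList      -- t = (s or "").strip()
  if t = [] then ""                        -- if not t: return ""
  else
    let u := PySem.Chars.strip (pvScan [] t)          -- u = ''.join(tail).strip()
    String.ofList (PySem.Chars.strip (pvRstripParen u))   -- return u.rstrip('(').strip()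

-- ===== PRECONDITION & SPEC =====
def Spec_callee_name_from_text (s : String) (out : String) : Prop := out = callee_name_from_text_alt s
instance (s : String) (out : String) : Decidable (Spec_callee_name_from_text s out) := by unfold Spec_callee_name_from_text; infer_instance

-- ===== CLAIM (what is proved, stated in full; the proofs are below) =====
def Claim_equal_callee_name_from_text : Prop := ∀ (s : String), Dom_callee_name_from_text s → Spec_callee_name_from_text s (callee_name_from_text s)

-- ===== LEMMAS AND PROOFS =====

-- proof-side view of one of A's split-and-take-last passes: a single scan for ONE
-- separator a :: sep', with the collected prefix as accumulator
def pvScan1 (a : Char) (sep' : List Char) : List Char → List Char → List Char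
  | acc, [] => acc
  | acc, c :: rest =>
    if (a :: sep').isPrefixOf (c :: rest) then
      pvScan1 a sep' [] (List.drop (a :: sep').length (c :: rest))
    else pvScan1 a sep' (acc ++ [c]) rest
termination_by _ l => l.length
decreasing_by all_goals simp

-- does one of the three separators occur in l?
def pvOcc : List Char → Bool
  | [] => false
  | c :: rest =>
    if (c = ':' ∧ rest.head? = some ':') ∨ c = '.' ∨ (c = '-' ∧ rest.head? = some '>') then true
    else pvOcc rest

lemma pvNotPre2 {x y c : Char} {rest : List Char} (h : ¬ (c = x ∧ rest.head? = some y)) :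
    [x, y].isPrefixOf (c :: rest) = false := by
  cases rest with
  | nil => simp [List.isPrefixOf]
  | cons r rs =>
    simp [List.isPrefixOf]
    intro h1 h2
    exact h ⟨h1.symm, by simp [h2]⟩

lemma pvPre2 {x y c : Char} {rest : List Char} (h : c = x ∧ rest.head? = some y) :
    [x, y].isPrefixOf (c :: rest) = true := by
  cases rest with
  | nil => simp at h
  | cons r rs => simp at h; simp [List.isPrefixOf, h.1, h.2]

-- the last piece of CPython's greedy split is the single-separator scan
lemma pvLastGo (a : Char) (sep' : List Char) :
    ∀ (fuel : Nat) (l cur : List Char) (acc : List (List Char)), l.length < fuel →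
      (PySem.Chars.splitOn.go (a :: sep') fuel l cur acc).getLastD [] = pvScan1 a sep' cur.reverse l := by
  intro fuel
  induction fuel with
  | zero => intro l cur acc h; omega
  | succ fuel ih =>
    intro l cur acc h
    match l with
    | [] =>
      rw [PySem.Chars.splitOn.go.eq_def]
      simp [pvScan1, List.getLastD_eq_getLast?, List.getLast?_reverse]
    | c :: rest =>
      rw [PySem.Chars.splitOn.go.eq_def]
      simp only []
      by_cases hp : (a :: sep').isPrefixOf (c :: rest) = true
      · rw [if_pos hp, ih _ _ _ (by simp at h ⊢; omega)]
        rw [pvScan1, if_pos hp]; rfl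
      · rw [if_neg hp, ih _ _ _ (by simp at h ⊢; omega)]
        rw [pvScan1, if_neg hp]; simp

lemma pvLastPart_eq (a : Char) (sep' : List Char) (t : List Char) :
    pvLastPart t (a :: sep') = pvScan1 a sep' [] t := by
  unfold pvLastPart PySem.Chars.splitOn
  simpa using pvLastGo a sep' (t.length + 1) t [] [] (by omega)

-- accumulator lemma: a scan either hits an occurrence (and forgets acc) or appends
lemma pvScan1_acc (a : Char) (sep' : List Char) :
    ∀ (l acc : List Char),
      pvScan1 a sep' acc l = if (a :: sep') <:+: l then pvScan1 a sep' [] l else acc ++ l := by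
  intro l
  induction l with
  | nil =>
    intro acc
    rw [if_neg (by simp)]
    simp [pvScan1]
  | cons c rest ih =>
    intro acc
    by_cases hp : (a :: sep').isPrefixOf (c :: rest) = true
    · rw [pvScan1, if_pos hp]
      rw [if_pos ((List.isPrefixOf_iff_prefix.mp hp).isInfix)]
      conv_rhs => rw [pvScan1, if_pos hp]
    · rw [pvScan1, if_neg hp, ih]
      have hiff : (a :: sep') <:+: (c :: rest) ↔ (a :: sep') <:+: rest := by
        rw [List.infix_cons_iff]
        have : ¬ (a :: sep') <+: (c :: rest) := fun hh => hp (List.isPrefixOf_iff_prefix.mpr hh)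
        tauto
      by_cases hi : (a :: sep') <:+: rest
      · rw [if_pos hi, if_pos (hiff.mpr hi)]
        conv_rhs => rw [pvScan1, if_neg hp, ih]
        rw [if_pos hi]
      · rw [if_neg hi, if_neg (fun hh => hi (hiff.mp hh))]
        simp

lemma pvScan1_of_not_infix (a : Char) (sep' : List Char) (l : List Char)
    (h : ¬ (a :: sep') <:+: l) : pvScan1 a sep' [] l = l := by
  have := pvScan1_acc a sep' l []
  rw [if_neg h] at this
  simpa using this

set_option maxHeartbeats 1000000 in
lemma pvOcc_iff (l : List Char) :
    pvOcc l = true ↔ ([':', ':'] <:+: l ∨ ['.'] <:+: l ∨ ['-', '>'] <:+: l) := by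
  induction l with
  | nil => simp [pvOcc]
  | cons c rest ih =>
    rw [pvOcc]
    by_cases hc : (c = ':' ∧ rest.head? = some ':') ∨ c = '.' ∨ (c = '-' ∧ rest.head? = some '>')
    · rw [if_pos hc]
      simp only [true_iff]
      rcases hc with h | h | h
      · exact Or.inl (List.IsPrefix.isInfix (List.isPrefixOf_iff_prefix.mp (pvPre2 h)))
      · exact Or.inr (Or.inl (List.IsPrefix.isInfix (by simp [h])))
      · exact Or.inr (Or.inr (List.IsPrefix.isInfix (List.isPrefixOf_iff_prefix.mp (pvPre2 h))))
    · rw [if_neg hc, ih]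
      have h1 : c = ':' → rest.head? ≠ some ':' := fun a b => hc (Or.inl ⟨a, b⟩)
      have h2 : c ≠ '.' := fun a => hc (Or.inr (Or.inl a))
      have h3 : c = '-' → rest.head? ≠ some '>' := fun a b => hc (Or.inr (Or.inr ⟨a, b⟩))
      have n1 : ¬ [':', ':'] <+: (c :: rest) := by
        intro hh
        have hb := List.isPrefixOf_iff_prefix.mpr hh
        rw [pvNotPre2 (fun hx => h1 hx.1 hx.2)] at hb
        cases hb
      have n2 : ¬ ['.'] <+: (c :: rest) := by
        intro hh
        exact h2 ((List.cons_prefix_cons.mp hh).1.symm)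
      have n3 : ¬ ['-', '>'] <+: (c :: rest) := by
        intro hh
        have hb := List.isPrefixOf_iff_prefix.mpr hh
        rw [pvNotPre2 (fun hx => h3 hx.1 hx.2)] at hb
        cases hb
      rw [List.infix_cons_iff, List.infix_cons_iff, List.infix_cons_iff]
      tauto

-- accumulator lemma for the combined scan
set_option maxHeartbeats 1000000 in
lemma pvScan_acc :
    ∀ (n : Nat) (l : List Char), l.length ≤ n → ∀ (acc : List Char),
      pvScan acc l = if pvOcc l then pvScan [] l else acc ++ l := by
  intro n
  induction n with
  | zero =>
    intro l hl acc
    have : l = [] := List.length_eq_zero_iff.mp (Nat.le_zero.mp hl)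
    subst this
    simp [pvScan, pvOcc]
  | succ n ih =>
    intro l hl acc
    match l with
    | [] => simp [pvScan, pvOcc]
    | c :: rest =>
      by_cases h1 : c = ':' ∧ rest.head? = some ':'
      · rw [pvScan, if_pos h1, pvOcc, if_pos (Or.inl h1)]
        simp only [if_true]
        conv_rhs => rw [pvScan, if_pos h1]
      · by_cases h2 : c = '.'
        · rw [pvScan, if_neg h1, if_pos h2, pvOcc, if_pos (Or.inr (Or.inl h2))]
          simp only [if_true]
          conv_rhs => rw [pvScan, if_neg h1, if_pos h2]
        · by_cases h3 : c = '-' ∧ rest.head? = some '>'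
          · rw [pvScan, if_neg h1, if_neg h2, if_pos h3, pvOcc, if_pos (Or.inr (Or.inr h3))]
            simp only [if_true]
            conv_rhs => rw [pvScan, if_neg h1, if_neg h2, if_pos h3]
          · have hrest : rest.length ≤ n := by simp at hl; omega
            rw [pvScan, if_neg h1, if_neg h2, if_neg h3, ih rest hrest]
            conv_rhs => rw [pvOcc]
            rw [if_neg (show ¬(c = ':' ∧ rest.head? = some ':' ∨ c = '.' ∨ c = '-' ∧ rest.head? = some '>') by tauto)]
            by_cases ho : pvOcc rest = true
            · rw [if_pos ho, if_pos ho]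
              conv_rhs => rw [pvScan, if_neg h1, if_neg h2, if_neg h3, ih rest hrest]
              rw [if_pos ho]
            · rw [if_neg ho, if_neg ho]
              simp

-- the heart: A's three sequential single-separator passes equal B's combined scan
set_option maxHeartbeats 1000000 in
lemma pvChain :
    ∀ (n : Nat) (l : List Char), l.length ≤ n →
      pvScan1 '-' ['>'] [] (pvScan1 '.' [] [] (pvScan1 ':' [':'] [] l)) = pvScan [] l := by
  intro n
  induction n with
  | zero =>
    intro l hl
    have : l = [] := List.length_eq_zero_iff.mp (Nat.le_zero.mp hl)
    subst this
    simp [pvScan, pvScan1]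
  | succ n ih =>
    intro l hl
    match l with
    | [] => simp [pvScan, pvScan1]
    | c :: rest =>
      by_cases h1 : c = ':' ∧ rest.head? = some ':'
      · -- separator "::" at the head: both sides reset
        obtain ⟨hc, hh⟩ := h1
        subst hc
        cases rest with
        | nil => simp at hh
        | cons r0 rs =>
          simp only [List.head?_cons, Option.some.injEq] at hh
          subst hh
          have e1 : pvScan1 ':' [':'] [] (':' :: ':' :: rs) = pvScan1 ':' [':'] [] rs := by
            rw [pvScan1, if_pos (by simp [List.isPrefixOf])]
            rfl
          rw [e1, ih rs (by simp at hl; omega)]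
          conv_rhs => rw [pvScan, if_pos ⟨rfl, rfl⟩, List.tail_cons]
      · by_cases h2 : c = '.'
        · -- separator "." at the head
          subst h2
          have hl' : rest.length ≤ n := by simp at hl; omega
          have e1 : pvScan1 ':' [':'] [] ('.' :: rest) = pvScan1 ':' [':'] ['.'] rest := by
            rw [pvScan1, if_neg (by simp [List.isPrefixOf]), List.nil_append]
          rw [e1, pvScan1_acc ':' [':'] rest ['.']]
          by_cases o1 : [':', ':'] <:+: rest
          · rw [if_pos o1, ih rest hl']
            conv_rhs => rw [pvScan, if_neg h1, if_pos rfl]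
          · rw [if_neg o1, List.singleton_append]
            have e2 : pvScan1 '.' [] [] ('.' :: rest) = pvScan1 '.' [] [] rest := by
              rw [pvScan1, if_pos (by simp [List.isPrefixOf])]
              rfl
            rw [e2]
            have ih' := ih rest hl'
            rw [pvScan1_of_not_infix ':' [':'] rest o1] at ih'
            rw [ih']
            conv_rhs => rw [pvScan, if_neg h1, if_pos rfl]
        · by_cases h3 : c = '-' ∧ rest.head? = some '>'
          · -- separator "->" at the head
            obtain ⟨hc, hh⟩ := h3
            subst hc
            cases rest with
            | nil => simp at hh
            | cons r0 rs =>
              simp only [List.head?_cons, Option.some.injEq] at hh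
              subst hh
              have hl' : rs.length ≤ n := by simp at hl; omega
              have e1 : pvScan1 ':' [':'] [] ('-' :: '>' :: rs) = pvScan1 ':' [':'] ['-', '>'] rs := by
                rw [pvScan1, if_neg (by simp [List.isPrefixOf]),
                    pvScan1, if_neg (by simp [List.isPrefixOf]), List.nil_append, List.singleton_append]
              rw [e1, pvScan1_acc ':' [':'] rs ['-', '>']]
              by_cases o1 : [':', ':'] <:+: rs
              · rw [if_pos o1, ih rs hl']
                have nc1 : ¬('-' = ':' ∧ ('>' :: rs).head? = some ':') := fun hx => absurd hx.1 (by decide)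
                have nc2 : ¬('-' = '.') := by decide
                conv_rhs => rw [pvScan, if_neg nc1, if_neg nc2, if_pos ⟨rfl, rfl⟩, List.tail_cons]
              · rw [if_neg o1, List.cons_append, List.singleton_append]
                have nc1 : ¬('-' = ':' ∧ ('>' :: rs).head? = some ':') := fun hx => absurd hx.1 (by decide)
                have nc2 : ¬('-' = '.') := by decide
                have e2 : pvScan1 '.' [] [] ('-' :: '>' :: rs) = pvScan1 '.' [] ['-', '>'] rs := by
                  rw [pvScan1, if_neg (by simp [List.isPrefixOf]), List.nil_append,
                      pvScan1, if_neg (by simp [List.isPrefixOf]), List.singleton_append]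
                rw [e2, pvScan1_acc '.' [] rs ['-', '>']]
                by_cases o2 : ['.'] <:+: rs
                · rw [if_pos o2]
                  have ih' := ih rs hl'
                  rw [pvScan1_of_not_infix ':' [':'] rs o1] at ih'
                  rw [ih']
                  conv_rhs => rw [pvScan, if_neg nc1, if_neg nc2, if_pos ⟨rfl, rfl⟩, List.tail_cons]
                · rw [if_neg o2, List.cons_append, List.singleton_append]
                  have e3 : pvScan1 '-' ['>'] [] ('-' :: '>' :: rs) = pvScan1 '-' ['>'] [] rs := by
                    rw [pvScan1, if_pos (by simp [List.isPrefixOf])]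
                    rfl
                  rw [e3]
                  have ih' := ih rs hl'
                  rw [pvScan1_of_not_infix ':' [':'] rs o1,
                      pvScan1_of_not_infix '.' [] rs o2] at ih'
                  rw [ih']
                  conv_rhs => rw [pvScan, if_neg nc1, if_neg nc2, if_pos ⟨rfl, rfl⟩, List.tail_cons]
          · -- ordinary character: appended on both sides
            have hl' : rest.length ≤ n := by simp at hl; omega
            have e1 : pvScan1 ':' [':'] [] (c :: rest) = pvScan1 ':' [':'] [c] rest := by
              rw [pvScan1, if_neg (by rw [pvNotPre2 h1]; simp), List.nil_append]
            rw [e1, pvScan1_acc ':' [':'] rest [c]]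
            by_cases o1 : [':', ':'] <:+: rest
            · rw [if_pos o1, ih rest hl']
              conv_rhs => rw [pvScan, if_neg h1, if_neg h2, if_neg h3, List.nil_append]
              rw [pvScan_acc rest.length rest le_rfl [c],
                  if_pos (by rw [pvOcc_iff]; tauto)]
            · rw [if_neg o1, List.singleton_append]
              have e2 : pvScan1 '.' [] [] (c :: rest) = pvScan1 '.' [] [c] rest := by
                rw [pvScan1, if_neg (by simp [List.isPrefixOf]; exact fun hh => h2 hh.symm), List.nil_append]
              rw [e2, pvScan1_acc '.' [] rest [c]]
              by_cases o2 : ['.'] <:+: rest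
              · rw [if_pos o2]
                have ih' := ih rest hl'
                rw [pvScan1_of_not_infix ':' [':'] rest o1] at ih'
                rw [ih']
                conv_rhs => rw [pvScan, if_neg h1, if_neg h2, if_neg h3, List.nil_append]
                rw [pvScan_acc rest.length rest le_rfl [c],
                    if_pos (by rw [pvOcc_iff]; tauto)]
              · rw [if_neg o2, List.singleton_append]
                have e3 : pvScan1 '-' ['>'] [] (c :: rest) = pvScan1 '-' ['>'] [c] rest := by
                  rw [pvScan1, if_neg (by rw [pvNotPre2 h3]; simp), List.nil_append]
                rw [e3, pvScan1_acc '-' ['>'] rest [c]]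
                by_cases o3 : ['-', '>'] <:+: rest
                · rw [if_pos o3]
                  have ih' := ih rest hl'
                  rw [pvScan1_of_not_infix ':' [':'] rest o1,
                      pvScan1_of_not_infix '.' [] rest o2] at ih'
                  rw [ih']
                  conv_rhs => rw [pvScan, if_neg h1, if_neg h2, if_neg h3, List.nil_append]
                  rw [pvScan_acc rest.length rest le_rfl [c],
                      if_pos (by rw [pvOcc_iff]; tauto)]
                · rw [if_neg o3, List.singleton_append]
                  conv_rhs => rw [pvScan, if_neg h1, if_neg h2, if_neg h3, List.nil_append]
                  rw [pvScan_acc rest.length rest le_rfl [c],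
                      if_neg (by rw [pvOcc_iff]; tauto), List.singleton_append]

-- ===== VERDICT (by name: the statement is the Claim_ definition above) =====
set_option maxHeartbeats 1000000 in
theorem callee_name_from_text_spec : Claim_equal_callee_name_from_text := by
  intro s _
  unfold Spec_callee_name_from_text callee_name_from_text callee_name_from_text_alt
  have estep : ∀ (a : Char) (sep' u : List Char),
      (if PySem.Chars.isIn (a :: sep') u then pvLastPart u (a :: sep') else u)
        = pvScan1 a sep' [] u := by
    intro a sep' u
    by_cases h : PySem.Chars.isIn (a :: sep') u = true
    · rw [if_pos h, pvLastPart_eq]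
    · rw [if_neg h,
        pvScan1_of_not_infix _ _ _ ((PySem.Chars.isIn_eq_false_iff _ _).mp (by simpa using h))]
  simp only [estep]
  rw [pvChain (PySem.Chars.strip s.toList).length _ le_rfl]
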